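-- pv_equiv track=rewrite | github.com/annemarie04/APD | Tema 1/Matrix Distribution/matrix_lines.py | calculate_line_distribution
-- ===== SOURCE A (Python) =====
-- def calculate_line_distribution(n, p):
--     """
--     Calculate how to distribute n matrix rows among p processes.
--     Returns information about which rows each process should handle.
--     """
--     line_info = []
--
--     # Calculate base number of rows per process and remainder
--     base_rows = n // p
--     extra_rows = n % p
--
--     start_row = 0
--     for rank in range(p):
--         # Processes with rank < extra_rows get one extra row
--         num_rows = base_rows + (1 if rank < extra_rows else 0)
--
--         line_info.append({
--             'rank': rank,
--             'start_row': start_row,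
--             'num_rows': num_rows,
--             'total_elements': num_rows * n  # num_rows * n_cols
--         })
--
--         start_row += num_rows
--
--     return line_info
-- ===== SOURCE B (Python) =====
-- def calculate_line_distribution(n, p):
--     base_rows = n // p
--     extra_rows = n % p
--     return [
--         {
--             'rank': rank,
--             'start_row': base_rows * rank + min(rank, extra_rows),
--             'num_rows': base_rows + (1 if rank < extra_rows else 0),
--             'total_elements': (base_rows + (1 if rank < extra_rows else 0)) * n,
--         }
--         for rank in range(p)
--     ]
-- ===== Notes on version B (the rewrite author's own statement) =====
-- stated objective: alternative
-- what changed: Each process's entry is computed independently from its rank via the closed form start_row = base_rows*rank + min(rank, extra_rows) in a list comprehension, instead of threading a running start_row accumulator through the loop.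
import Mathlib
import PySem

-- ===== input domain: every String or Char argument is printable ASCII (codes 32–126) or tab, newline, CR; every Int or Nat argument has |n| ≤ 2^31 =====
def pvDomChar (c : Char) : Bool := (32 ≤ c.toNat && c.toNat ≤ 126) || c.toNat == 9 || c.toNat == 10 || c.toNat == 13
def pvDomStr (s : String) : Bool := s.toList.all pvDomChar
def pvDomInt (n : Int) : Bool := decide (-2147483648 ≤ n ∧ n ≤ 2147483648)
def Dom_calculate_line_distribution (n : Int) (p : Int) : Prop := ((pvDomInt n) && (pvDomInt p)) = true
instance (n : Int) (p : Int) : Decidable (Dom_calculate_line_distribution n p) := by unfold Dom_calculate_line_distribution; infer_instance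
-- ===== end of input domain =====

-- B replaces A's running start_row accumulator with the closed form
-- base_rows*rank + min(rank, extra_rows), so each entry depends only on rank. (alternative, same cost)

-- ===== PORT A =====
def calculate_line_distribution (n : Int) (p : Int) : List (List (String × Int)) :=
  let base_rows := PySem.Int.floordiv n p
  let extra_rows := PySem.Int.mod n p
  let st := (PySem.List.pyRange 0 p 1).foldl
    (fun (s : List (List (String × Int)) × Int) rank =>
      let num_rows := base_rows + (if rank < extra_rows then (1 : Int) else 0)
      (s.1 ++ [[("rank", rank), ("start_row", s.2), ("num_rows", num_rows),
                ("total_elements", num_rows * n)]],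
       s.2 + num_rows))
    ([], 0)
  st.1

-- ===== PORT B =====
def calculate_line_distribution_alt (n : Int) (p : Int) : List (List (String × Int)) :=
  let base_rows := PySem.Int.floordiv n p
  let extra_rows := PySem.Int.mod n p
  (PySem.List.pyRange 0 p 1).map (fun rank =>
    [("rank", rank),
     ("start_row", base_rows * rank + min rank extra_rows),
     ("num_rows", base_rows + (if rank < extra_rows then (1 : Int) else 0)),
     ("total_elements", (base_rows + (if rank < extra_rows then (1 : Int) else 0)) * n)])

-- ===== PRECONDITION & SPEC =====
-- A raises ZeroDivisionError exactly when p = 0.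
def Pre_calculate_line_distribution (n : Int) (p : Int) : Prop := p ≠ 0
instance (n : Int) (p : Int) : Decidable (Pre_calculate_line_distribution n p) := by unfold Pre_calculate_line_distribution; infer_instance
def pvWitness_calculate_line_distribution : Int × Int := (7, 3)

def Spec_calculate_line_distribution (n : Int) (p : Int) (out : List (List (String × Int))) : Prop := out = calculate_line_distribution_alt n p
instance (n : Int) (p : Int) (out : List (List (String × Int))) : Decidable (Spec_calculate_line_distribution n p out) := by unfold Spec_calculate_line_distribution; infer_instance

-- ===== CLAIM (what is proved, stated in full; the proofs are below) =====
def Claim_equal_calculate_line_distribution : Prop := ∀ (n : Int) (p : Int), Dom_calculate_line_distribution n p → Pre_calculate_line_distribution n p → Spec_calculate_line_distribution n p (calculate_line_distribution n p)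

-- ===== LEMMAS AND PROOFS =====

-- A's fold over [a, b) with running start s0 = base*a + min a extra produces the
-- closed-form entries of B, appended to the accumulator.
theorem pv_fold_closed (n base extra : Int) :
    ∀ (k : Nat) (a b : Int) (acc : List (List (String × Int))),
      b - a = (k : Int) →
      ((PySem.List.pyRange a b 1).foldl
        (fun (s : List (List (String × Int)) × Int) rank =>
          let num_rows := base + (if rank < extra then (1 : Int) else 0)
          (s.1 ++ [[("rank", rank), ("start_row", s.2), ("num_rows", num_rows),
                    ("total_elements", num_rows * n)]],
           s.2 + num_rows))
        (acc, base * a + min a extra)).1 =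
      acc ++ (PySem.List.pyRange a b 1).map (fun rank =>
        [("rank", rank),
         ("start_row", base * rank + min rank extra),
         ("num_rows", base + (if rank < extra then (1 : Int) else 0)),
         ("total_elements", (base + (if rank < extra then (1 : Int) else 0)) * n)]) := by
  intro k
  induction k with
  | zero =>
      intro a b acc h
      rw [PySem.List.pyRange_one_eq_nil (by omega)]
      simp
  | succ m ih =>
      intro a b acc h
      rw [PySem.List.pyRange_one_cons (by omega)]
      simp only [List.foldl_cons, List.map_cons]
      have hstep : base * a + min a extra + (base + (if a < extra then (1 : Int) else 0))
          = base * (a + 1) + min (a + 1) extra := by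
        by_cases hlt : a < extra <;> simp [hlt] <;> ring_nf <;> omega
      rw [hstep, ih (a + 1) b _ (by omega)]
      simp

-- ===== VERDICT (by name: the statement is the Claim_ definition above) =====
theorem calculate_line_distribution_spec : Claim_equal_calculate_line_distribution := by
  intro n p _ hp
  unfold Spec_calculate_line_distribution calculate_line_distribution calculate_line_distribution_alt
  by_cases hpos : 0 < p
  · have hmin : min (0 : Int) (PySem.Int.mod n p) = 0 := by
      have := PySem.Int.mod_eq_emod_of_pos (a := n) hpos
      have : 0 ≤ PySem.Int.mod n p := by rw [this]; exact Int.emod_nonneg n (by omega)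
      omega
    have := pv_fold_closed n (PySem.Int.floordiv n p) (PySem.Int.mod n p)
      p.toNat 0 p [] (by omega)
    simp only [mul_zero, zero_add, hmin] at this
    simpa using this
  · rw [PySem.List.pyRange_one_eq_nil (by omega)]
    simp
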